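-- pv_equiv track=rewrite | github.com/sut-compiler/Materials | Project/1402-1/Phase 1/Testcases/test/evaluator.py | calc_line_content_edit_penalty
-- ===== SOURCE A (Python) =====
-- def calc_alignment_score(first, second, del_penalty=-1, edit_penalty=-1, match_score=0):
--     dp = [[(0, -1) for j in range(len(second) + 1)]
--           for i in range(len(first) + 1)]
--
--     # These are used for tracking the comparison decisions
--     FDEL = 0
--     SDEL = 1
--     MATCH = 2
--
--     calc_del_penalty = del_penalty
--     calc_edit_penalty = edit_penalty
--     calc_match_score = match_score
--
--     if isinstance(del_penalty, int):
--         def calc_del_penalty(x): return del_penalty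
--
--     if isinstance(edit_penalty, int):
--         def calc_edit_penalty(x, y): return edit_penalty
--
--     if isinstance(match_score, int):
--         def calc_match_score(x, y): return match_score
--
--     for i in range(1, len(first) + 1):
--         dp[i][0] = (calc_del_penalty(first[i - 1]) * i, FDEL)
--
--     for j in range(1, len(second) + 1):
--         dp[0][j] = (calc_del_penalty(second[j - 1]) * j, SDEL)
--
--     dp[0][0] = (0, -1)
--
--     for i in range(1, len(first) + 1):
--         for j in range(1, len(second) + 1):
--             dp[i][j] = max(
--                 [
--                     (dp[i - 1][j][0] + calc_del_penalty(first[i - 1]), FDEL),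
--                     (dp[i][j - 1][0] + calc_del_penalty(second[j - 1]), SDEL),
--                     (dp[i - 1][j - 1][0] +
--                      (calc_match_score(first[i - 1], second[j - 1])
--                       if first[i - 1] == second[j - 1]
--                       else calc_edit_penalty(first[i - 1], second[j - 1])),
--                      MATCH)
--                 ],
--                 key=lambda x: x[0])
--
--     return dp[len(first)][len(second)][0]
--
-- def calc_line_content_edit_penalty(x, y):
--     penalty = 0
--     if x[0] != y[0]:
--         penalty -= 1
--
--     return penalty + calc_alignment_score(
--         x[1], y[1],
--         del_penalty=lambda x: -len(x),
--         edit_penalty=lambda x, y: sum(0 if a == b else -1 for a, b in zip(x, y)))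
-- ===== SOURCE B (Python) =====
-- def calc_line_content_edit_penalty(x, y):
--     first, second = x[1], y[1]
--     m, n = len(first), len(second)
--     fd = [-len(w) for w in first]
--     sd = [-len(w) for w in second]
--     w = n + 1
--     memo = {}
--
--     def best(i, j):
--         k = i * w + j
--         if k in memo:
--             return memo[k]
--         if i == 0 and j == 0:
--             r = 0
--         elif j == 0:
--             r = fd[i - 1] * i
--         elif i == 0:
--             r = sd[j - 1] * j
--         else:
--             a, b = first[i - 1], second[j - 1]
--             r = best(i - 1, j) + fd[i - 1]
--             r2 = best(i, j - 1) + sd[j - 1]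
--             if r2 > r:
--                 r = r2
--             r3 = best(i - 1, j - 1) + (0 if a == b else sum(0 if c == d else -1 for c, d in zip(a, b)))
--             if r3 > r:
--                 r = r3
--         memo[k] = r
--         return r
--
--     # demand-driven fill along anti-diagonals keeps the recursion depth O(1)
--     for s in range(m + n + 1):
--         for i in range(max(0, s - n), min(m, s) + 1):
--             best(i, s - i)
--
--     return best(m, n) - (1 if x[0] != y[0] else 0)
-- ===== Notes on version B (the rewrite author's own statement) =====
-- stated objective: alternative
-- what changed: Replaces A's bottom-up 2D table of (score, move-tag) tuples filled by nested index loops with a top-down memoized recursion best(i, j) over a dictionary keyed by (i, j), evaluated demand-driven along anti-diagonals, keeping only scores (no tags, no max-by-key).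
import Mathlib
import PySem

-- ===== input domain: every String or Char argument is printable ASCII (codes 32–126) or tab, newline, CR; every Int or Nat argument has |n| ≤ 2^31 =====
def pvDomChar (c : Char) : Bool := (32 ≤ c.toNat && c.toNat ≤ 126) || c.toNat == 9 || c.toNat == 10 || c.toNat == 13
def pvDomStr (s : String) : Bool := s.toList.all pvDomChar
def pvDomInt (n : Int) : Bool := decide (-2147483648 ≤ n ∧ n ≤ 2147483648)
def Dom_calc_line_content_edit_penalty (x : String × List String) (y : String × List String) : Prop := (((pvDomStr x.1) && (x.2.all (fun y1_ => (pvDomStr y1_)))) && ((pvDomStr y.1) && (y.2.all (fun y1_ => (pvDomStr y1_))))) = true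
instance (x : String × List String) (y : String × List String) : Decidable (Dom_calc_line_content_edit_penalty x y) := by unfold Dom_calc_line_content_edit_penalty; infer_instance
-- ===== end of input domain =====

-- B replaces A's bottom-up 2D table of tagged tuples by a top-down memoized
-- recursion best(i,j) over a dictionary, driven along anti-diagonals (objective: alternative decomposition).

-- ===== PORT A =====
-- del_penalty lambda: -len(x)
def pvDelA (s : String) : Int := -(PySem.Str.len s)
-- edit_penalty lambda: sum(0 if a == b else -1 for a, b in zip(x, y))
def pvEditA (a b : String) : Int :=
  (a.toList.zip b.toList).foldl (fun acc p => acc + (if p.1 = p.2 then 0 else -1)) 0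
-- dp[i][j] read / write on the list-of-lists table
def pvTget (t : List (List (Int × Int))) (i j : Nat) : Int × Int := (t.getD i []).getD j (0, 0)
def pvTset (t : List (List (Int × Int))) (i j : Nat) (v : Int × Int) : List (List (Int × Int)) :=
  t.set i ((t.getD i []).set j v)
-- max([...], key=lambda x: x[0]) over the three candidates: first one wins ties
def pvMax3 (a b c : Int × Int) : Int × Int :=
  let b1 := if b.1 > a.1 then b else a
  if c.1 > b1.1 then c else b1

-- calc_alignment_score specialized to the call site's penalties (match_score = 0 via the isinstance branch)
def pvAlignA (first second : List String) : Int :=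
  let m := first.length
  let n := second.length
  let dp0 : List (List (Int × Int)) :=
    (List.range (m+1)).map (fun _ => (List.range (n+1)).map (fun _ => ((0 : Int), (-1 : Int))))
  -- for i in range(1, len(first)+1): dp[i][0] = (del(first[i-1]) * i, FDEL) ; loop variable i = i'+1
  let dp1 := (List.range m).foldl
    (fun dp i' => pvTset dp (i'+1) 0 (pvDelA (first.getD i' "") * ((i' : Int) + 1), 0)) dp0
  let dp2 := (List.range n).foldl
    (fun dp j' => pvTset dp 0 (j'+1) (pvDelA (second.getD j' "") * ((j' : Int) + 1), 1)) dp1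
  let dp3 := pvTset dp2 0 0 (0, -1)
  let dp4 := (List.range m).foldl (fun dp i' =>
    (List.range n).foldl (fun dp j' =>
      pvTset dp (i'+1) (j'+1) (pvMax3
        ((pvTget dp i' (j'+1)).1 + pvDelA (first.getD i' ""), 0)
        ((pvTget dp (i'+1) j').1 + pvDelA (second.getD j' ""), 1)
        ((pvTget dp i' j').1 +
          (if first.getD i' "" = second.getD j' "" then 0
           else pvEditA (first.getD i' "") (second.getD j' "")), 2))) dp) dp3
  (pvTget dp4 m n).1

def calc_line_content_edit_penalty (x : String × List String) (y : String × List String) : Int :=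
  let penalty : Int := if x.1 ≠ y.1 then -1 else 0
  penalty + pvAlignA x.2 y.2

-- ===== PORT B =====
def pvMismatchB (a b : String) : Int :=
  (a.toList.zip b.toList).foldl (fun acc p => acc + (if p.1 = p.2 then 0 else -1)) 0

-- best(i, j) with the memo dictionary (keyed by k = i*w + j) threaded through
def pvBestM (first second : List String) (fd sd : List Int) (w : Nat) :
    Nat → Nat → PySem.Dict Nat Int → Int × PySem.Dict Nat Int
  | i, j, memo =>
    let k := i * w + j
    match PySem.Dict.get? memo k with
    | some v => (v, memo)
    | none =>
      let rm : Int × PySem.Dict Nat Int :=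
        match i, j with
        | 0, 0 => ((0 : Int), memo)
        | i'+1, 0 => (fd.getD i' 0 * ((i' : Int) + 1), memo)
        | 0, j'+1 => (sd.getD j' 0 * ((j' : Int) + 1), memo)
        | i'+1, j'+1 =>
          let a := first.getD i' ""
          let b := second.getD j' ""
          let p1 := pvBestM first second fd sd w i' (j'+1) memo
          let p2 := pvBestM first second fd sd w (i'+1) j' p1.2
          let r := p1.1 + fd.getD i' 0
          let r2 := p2.1 + sd.getD j' 0
          let r' := if r2 > r then r2 else r
          let p3 := pvBestM first second fd sd w i' j' p2.2
          let r3 := p3.1 + (if a = b then 0 else pvMismatchB a b)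
          (if r3 > r' then r3 else r', p3.2)
      (rm.1, PySem.Dict.insert rm.2 k rm.1)
termination_by i j _ => i + j

def calc_line_content_edit_penalty_alt (x : String × List String) (y : String × List String) : Int :=
  let first := x.2
  let second := y.2
  let m := first.length
  let n := second.length
  let fd := first.map (fun wd => -(PySem.Str.len wd))
  let sd := second.map (fun wd => -(PySem.Str.len wd))
  let w := n + 1
  -- anti-diagonal driver: for s in range(m+n+1): for i in range(max(0, s-n), min(m, s)+1): best(i, s-i)
  let memo := (PySem.List.pyRange 0 ((m : Int) + (n : Int) + 1) 1).foldl (fun memo s =>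
    (PySem.List.pyRange (max 0 (s - (n : Int))) (min (m : Int) s + 1) 1).foldl (fun memo i =>
      (pvBestM first second fd sd w i.toNat (s - i).toNat memo).2) memo) PySem.Dict.empty
  (pvBestM first second fd sd w m n memo).1 - (if x.1 ≠ y.1 then 1 else 0)

-- ===== PRECONDITION & SPEC =====
def Spec_calc_line_content_edit_penalty (x : String × List String) (y : String × List String) (out : Int) : Prop := out = calc_line_content_edit_penalty_alt x y
instance (x : String × List String) (y : String × List String) (out : Int) : Decidable (Spec_calc_line_content_edit_penalty x y out) := by unfold Spec_calc_line_content_edit_penalty; infer_instance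

-- ===== CLAIM (what is proved, stated in full; the proofs are below) =====
def Claim_equal_calc_line_content_edit_penalty : Prop := ∀ (x : String × List String) (y : String × List String), Dom_calc_line_content_edit_penalty x y → Spec_calc_line_content_edit_penalty x y (calc_line_content_edit_penalty x y)

-- ===== LEMMAS AND PROOFS =====

def pvBest (first second : List String) : Nat → Nat → Int
  | 0, 0 => 0
  | i'+1, 0 => -(PySem.Str.len (first.getD i' "")) * ((i' : Int) + 1)
  | 0, j'+1 => -(PySem.Str.len (second.getD j' "")) * ((j' : Int) + 1)
  | i'+1, j'+1 =>
    max (max (pvBest first second i' (j'+1) - PySem.Str.len (first.getD i' ""))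
             (pvBest first second (i'+1) j' - PySem.Str.len (second.getD j' "")))
        (pvBest first second i' j' + (if first.getD i' "" = second.getD j' "" then 0
                                      else pvMismatchB (first.getD i' "") (second.getD j' "")))
termination_by i j => i + j

theorem pvBest_ss (first second : List String) (i' j' : Nat) :
    pvBest first second (i'+1) (j'+1) =
    max (max (pvBest first second i' (j'+1) - PySem.Str.len (first.getD i' ""))
             (pvBest first second (i'+1) j' - PySem.Str.len (second.getD j' "")))
        (pvBest first second i' j' + (if first.getD i' "" = second.getD j' "" then 0
                                      else pvMismatchB (first.getD i' "") (second.getD j' ""))) := by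
  rw [pvBest.eq_def]

def MemoOK (first second : List String) (w : Nat) (memo : PySem.Dict Nat Int) : Prop :=
  ∀ k v, PySem.Dict.get? memo k = some v → v = pvBest first second (k / w) (k % w)

theorem key_div {j w : Nat} (i : Nat) (hj : j < w) : (i * w + j) / w = i := by
  rw [Nat.add_comm, Nat.add_mul_div_right _ _ (by omega), Nat.div_eq_of_lt hj]
  omega

theorem key_mod {j w : Nat} (i : Nat) (hj : j < w) : (i * w + j) % w = j := by
  rw [Nat.add_comm, Nat.add_mul_mod_self_right, Nat.mod_eq_of_lt hj]

theorem fd_getD (first : List String) (i' : Nat) :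
    (first.map (fun wd => -(PySem.Str.len wd))).getD i' 0 = -(PySem.Str.len (first.getD i' "")) := by
  simp only [List.getD, List.getElem?_map]
  cases h : first[i']? <;> simp [PySem.Str.len]

theorem if_gt_max (a b : Int) : (if b > a then b else a) = max a b := by
  split_ifs <;> omega

theorem memoOK_insert (first second : List String) (w : Nat) (memo : PySem.Dict Nat Int)
    (h : MemoOK first second w memo) (i j : Nat) (hj : j < w) (r : Int)
    (hr : r = pvBest first second i j) :
    MemoOK first second w (PySem.Dict.insert memo (i * w + j) r) := by
  intro k v hg
  rw [PySem.Dict.get?_insert] at hg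
  split at hg
  · cases hg; rename_i hp; subst hp
    rw [key_div i hj, key_mod i hj]; exact hr
  · exact h k v hg

theorem bestM_spec (first second : List String) (fd sd : List Int) (w : Nat)
    (hfd : fd = first.map (fun wd => -(PySem.Str.len wd)))
    (hsd : sd = second.map (fun wd => -(PySem.Str.len wd)))
    (i j : Nat) (hj : j < w) (memo : PySem.Dict Nat Int) (h : MemoOK first second w memo) :
    (pvBestM first second fd sd w i j memo).1 = pvBest first second i j ∧
      MemoOK first second w (pvBestM first second fd sd w i j memo).2 := by
  cases hm : PySem.Dict.get? memo (i * w + j) with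
  | some v =>
    have hv := h _ _ hm
    rw [key_div i hj, key_mod i hj] at hv
    rw [pvBestM.eq_def]
    simp only [hm]
    exact ⟨hv, h⟩
  | none =>
    match i, j with
    | 0, 0 =>
      rw [pvBestM.eq_def]; simp only [hm]
      exact ⟨by simp [pvBest], memoOK_insert _ _ _ _ h 0 0 hj _ (by simp [pvBest])⟩
    | i'+1, 0 =>
      rw [pvBestM.eq_def]; simp only [hm]
      refine ⟨?_, memoOK_insert _ _ _ _ h (i'+1) 0 hj _ ?_⟩ <;>
        (subst hfd; rw [fd_getD]; simp [pvBest])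
    | 0, j'+1 =>
      rw [pvBestM.eq_def]; simp only [hm]
      refine ⟨?_, memoOK_insert _ _ _ _ h 0 (j'+1) hj _ ?_⟩ <;>
        (subst hsd; rw [fd_getD]; simp [pvBest])
    | i'+1, j'+1 =>
      have h1 := bestM_spec first second fd sd w hfd hsd i' (j'+1) hj memo h
      have h2 := bestM_spec first second fd sd w hfd hsd (i'+1) j' (by omega) _ h1.2
      have h3 := bestM_spec first second fd sd w hfd hsd i' j' (by omega) _ h2.2
      rw [pvBestM.eq_def]; simp only [hm]
      have hval : (if (pvBestM first second fd sd w i' j'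
            (pvBestM first second fd sd w (i'+1) j'
              (pvBestM first second fd sd w i' (j'+1) memo).2).2).1 +
              (if first.getD i' "" = second.getD j' "" then 0
               else pvMismatchB (first.getD i' "") (second.getD j' "")) >
            (if (pvBestM first second fd sd w (i'+1) j'
                  (pvBestM first second fd sd w i' (j'+1) memo).2).1 + sd.getD j' 0 >
                (pvBestM first second fd sd w i' (j'+1) memo).1 + fd.getD i' 0
              then (pvBestM first second fd sd w (i'+1) j'
                  (pvBestM first second fd sd w i' (j'+1) memo).2).1 + sd.getD j' 0
              else (pvBestM first second fd sd w i' (j'+1) memo).1 + fd.getD i' 0)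
          then (pvBestM first second fd sd w i' j'
            (pvBestM first second fd sd w (i'+1) j'
              (pvBestM first second fd sd w i' (j'+1) memo).2).2).1 +
              (if first.getD i' "" = second.getD j' "" then 0
               else pvMismatchB (first.getD i' "") (second.getD j' ""))
          else (if (pvBestM first second fd sd w (i'+1) j'
                  (pvBestM first second fd sd w i' (j'+1) memo).2).1 + sd.getD j' 0 >
                (pvBestM first second fd sd w i' (j'+1) memo).1 + fd.getD i' 0
              then (pvBestM first second fd sd w (i'+1) j'
                  (pvBestM first second fd sd w i' (j'+1) memo).2).1 + sd.getD j' 0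
              else (pvBestM first second fd sd w i' (j'+1) memo).1 + fd.getD i' 0))
          = pvBest first second (i'+1) (j'+1) := by
        rw [if_gt_max, if_gt_max, h1.1, h2.1, h3.1, pvBest_ss]
        subst hfd hsd
        rw [fd_getD, fd_getD, sub_eq_add_neg, sub_eq_add_neg]
      exact ⟨hval, memoOK_insert _ _ _ _ h3.2 (i'+1) (j'+1) hj _ hval⟩
termination_by i + j

theorem memoOK_foldl {α : Type} (first second : List String) (w : Nat)
    (step : PySem.Dict Nat Int → α → PySem.Dict Nat Int) :
    ∀ (l : List α), (∀ m a, a ∈ l → MemoOK first second w m → MemoOK first second w (step m a)) →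
      ∀ (m : PySem.Dict Nat Int), MemoOK first second w m → MemoOK first second w (l.foldl step m) := by
  intro l
  induction l with
  | nil => intro _ m hm; exact hm
  | cons a t ih =>
    intro hstep m hm
    exact ih (fun m' a' ha' => hstep m' a' (List.mem_cons_of_mem _ ha')) _
      (hstep m a (List.mem_cons_self) hm)

theorem alt_eq (x y : String × List String) :
    calc_line_content_edit_penalty_alt x y =
      pvBest x.2 y.2 x.2.length y.2.length - (if x.1 ≠ y.1 then 1 else 0) := by
  have hempty : MemoOK x.2 y.2 (y.2.length + 1) PySem.Dict.empty := by
    intro k v hg; rw [PySem.Dict.get?_empty] at hg; cases hg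
  have hinner : ∀ (s : Int) (m : PySem.Dict Nat Int),
      MemoOK x.2 y.2 (y.2.length + 1) m →
      MemoOK x.2 y.2 (y.2.length + 1)
        ((PySem.List.pyRange (max 0 (s - (y.2.length : Int))) (min (x.2.length : Int) s + 1) 1).foldl
          (fun m' (i : Int) =>
            (pvBestM x.2 y.2 (x.2.map (fun wd => -(PySem.Str.len wd)))
              (y.2.map (fun wd => -(PySem.Str.len wd))) (y.2.length + 1)
              i.toNat (s - i).toNat m').2) m) := by
    intro s
    refine memoOK_foldl x.2 y.2 (y.2.length + 1) _ _ (fun m' i hi hm' => ?_)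
    rw [PySem.List.mem_pyRange_one] at hi
    exact (bestM_spec x.2 y.2 _ _ (y.2.length + 1) rfl rfl i.toNat ((s - i).toNat)
      (by omega) m' hm').2
  have hok := memoOK_foldl x.2 y.2 (y.2.length + 1)
    (fun memo (s : Int) =>
      (PySem.List.pyRange (max 0 (s - (y.2.length : Int))) (min (x.2.length : Int) s + 1) 1).foldl
        (fun memo (i : Int) =>
          (pvBestM x.2 y.2 (x.2.map (fun wd => -(PySem.Str.len wd)))
            (y.2.map (fun wd => -(PySem.Str.len wd))) (y.2.length + 1)
            i.toNat (s - i).toNat memo).2) memo)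
    (PySem.List.pyRange 0 ((x.2.length : Int) + (y.2.length : Int) + 1) 1)
    (fun m s _ hm => hinner s m hm) PySem.Dict.empty hempty
  simp only [calc_line_content_edit_penalty_alt]
  rw [(bestM_spec x.2 y.2 _ _ (y.2.length + 1) rfl rfl x.2.length y.2.length
    (by omega) _ hok).1]

def pvSz (m n : Nat) (t : List (List (Int × Int))) : Prop :=
  t.length = m + 1 ∧ ∀ r ∈ t, r.length = n + 1

theorem row_len {m n : Nat} {t : List (List (Int × Int))} (h : pvSz m n t) {i : Nat} (hi : i ≤ m) :
    (t.getD i []).length = n + 1 := by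
  have hlt : i < t.length := by rw [h.1]; omega
  rw [List.getD, List.getElem?_eq_getElem hlt]
  exact h.2 _ (List.getElem_mem hlt)

theorem sz_tset {m n : Nat} {t : List (List (Int × Int))} (h : pvSz m n t) {i j : Nat} (hi : i ≤ m)
    (v : Int × Int) : pvSz m n (pvTset t i j v) := by
  constructor
  · simp [pvTset, h.1]
  · intro r hr
    rcases List.mem_or_eq_of_mem_set hr with hmem | heq
    · exact h.2 _ hmem
    · rw [heq, List.length_set]; exact row_len h hi

theorem tget_tset_ne_row {t : List (List (Int × Int))} {i i' : Nat} (j j' : Nat) (v : Int × Int)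
    (h : i' ≠ i) : pvTget (pvTset t i j v) i' j' = pvTget t i' j' := by
  unfold pvTget pvTset
  simp only [List.getD]
  rw [List.getElem?_set_ne (by omega)]

theorem tget_tset_ne_col {t : List (List (Int × Int))} (i i' : Nat) {j j' : Nat} (v : Int × Int)
    (h : j' ≠ j) : pvTget (pvTset t i j v) i' j' = pvTget t i' j' := by
  by_cases hi : i' = i
  · subst hi
    by_cases hlen : i' < t.length
    · unfold pvTget pvTset
      simp only [List.getD]
      rw [List.getElem?_set_self hlen]
      simp only [Option.getD_some]
      rw [List.getElem?_set_ne (by omega)]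
    · unfold pvTget pvTset
      rw [List.set_eq_of_length_le (by omega)]
  · exact tget_tset_ne_row _ _ _ hi

theorem tget_tset_self {t : List (List (Int × Int))} {i j : Nat} (v : Int × Int)
    (hi : i < t.length) (hj : j < (t.getD i []).length) : pvTget (pvTset t i j v) i j = v := by
  unfold pvTget pvTset
  simp only [List.getD]
  rw [List.getElem?_set_self hi]
  simp only [Option.getD_some]
  rw [List.getElem?_set_self (by simpa [List.getD] using hj)]
  rfl

theorem dp0_sz (m n : Nat) :
    pvSz m n ((List.range (m+1)).map (fun _ => (List.range (n+1)).map (fun _ => ((0 : Int), (-1 : Int))))) := by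
  constructor
  · simp
  · intro r hr
    simp only [List.mem_map] at hr
    obtain ⟨a, _, ha⟩ := hr
    simp [← ha]

theorem pvMax3_fst (a b c : Int × Int) : (pvMax3 a b c).1 = max (max a.1 b.1) c.1 := by
  unfold pvMax3
  dsimp only
  split_ifs <;> omega

theorem colloop (first : List String) {m n : Nat} (t : List (List (Int × Int))) (ht : pvSz m n t) :
    ∀ k, k ≤ m →
      pvSz m n ((List.range k).foldl
        (fun dp i' => pvTset dp (i'+1) 0 (pvDelA (first.getD i' "") * ((i' : Int) + 1), 0)) t) ∧
      (∀ a b, a = 0 ∨ a > k ∨ b ≠ 0 →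
        pvTget ((List.range k).foldl
          (fun dp i' => pvTset dp (i'+1) 0 (pvDelA (first.getD i' "") * ((i' : Int) + 1), 0)) t) a b
          = pvTget t a b) ∧
      (∀ i' < k,
        pvTget ((List.range k).foldl
          (fun dp i' => pvTset dp (i'+1) 0 (pvDelA (first.getD i' "") * ((i' : Int) + 1), 0)) t)
          (i'+1) 0 = (pvDelA (first.getD i' "") * ((i' : Int) + 1), 0)) := by
  intro k
  induction k with
  | zero => intro _; exact ⟨ht, fun a b _ => rfl, fun i' h => absurd h (by omega)⟩
  | succ k ih =>
    intro hk
    obtain ⟨ihs, ihu, ihv⟩ := ih (by omega)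
    rw [List.range_succ, List.foldl_append, List.foldl_cons, List.foldl_nil]
    refine ⟨sz_tset ihs (by omega) _, ?_, ?_⟩
    · intro a b hab
      rcases Decidable.em (b = 0) with hb | hb
      · have ha : a ≠ k + 1 := by omega
        rw [tget_tset_ne_row _ _ _ ha]
        exact ihu a b (by omega)
      · rw [tget_tset_ne_col _ _ _ hb]
        exact ihu a b (by omega)
    · intro i' hi'
      rcases Decidable.em (i' = k) with he | he
      · subst he
        exact tget_tset_self _ (by rw [ihs.1]; omega) (by rw [row_len ihs (by omega)]; omega)
      · rw [tget_tset_ne_row _ _ _ (by omega)]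
        exact ihv i' (by omega)

theorem rowloop (second : List String) {m n : Nat} (t : List (List (Int × Int))) (ht : pvSz m n t) :
    ∀ k, k ≤ n →
      pvSz m n ((List.range k).foldl
        (fun dp j' => pvTset dp 0 (j'+1) (pvDelA (second.getD j' "") * ((j' : Int) + 1), 1)) t) ∧
      (∀ a b, b = 0 ∨ b > k ∨ a ≠ 0 →
        pvTget ((List.range k).foldl
          (fun dp j' => pvTset dp 0 (j'+1) (pvDelA (second.getD j' "") * ((j' : Int) + 1), 1)) t) a b
          = pvTget t a b) ∧
      (∀ j' < k,
        pvTget ((List.range k).foldl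
          (fun dp j' => pvTset dp 0 (j'+1) (pvDelA (second.getD j' "") * ((j' : Int) + 1), 1)) t)
          0 (j'+1) = (pvDelA (second.getD j' "") * ((j' : Int) + 1), 1)) := by
  intro k
  induction k with
  | zero => intro _; exact ⟨ht, fun a b _ => rfl, fun j' h => absurd h (by omega)⟩
  | succ k ih =>
    intro hk
    obtain ⟨ihs, ihu, ihv⟩ := ih (by omega)
    rw [List.range_succ, List.foldl_append, List.foldl_cons, List.foldl_nil]
    refine ⟨sz_tset ihs (by omega) _, ?_, ?_⟩
    · intro a b hab
      rcases Decidable.em (a = 0) with ha | ha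
      · have hb : b ≠ k + 1 := by omega
        rw [tget_tset_ne_col _ _ _ hb]
        exact ihu a b (by omega)
      · rw [tget_tset_ne_row _ _ _ ha]
        exact ihu a b (by omega)
    · intro j' hj'
      rcases Decidable.em (j' = k) with he | he
      · subst he
        exact tget_tset_self _ (by rw [ihs.1]; omega) (by rw [row_len ihs (by omega)]; omega)
      · rw [tget_tset_ne_col _ _ _ (by omega)]
        exact ihv j' (by omega)


def pvStepIn (first second : List String) (i' : Nat) (dp : List (List (Int × Int))) (j' : Nat) :
    List (List (Int × Int)) :=
  pvTset dp (i'+1) (j'+1) (pvMax3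
    ((pvTget dp i' (j'+1)).1 + pvDelA (first.getD i' ""), 0)
    ((pvTget dp (i'+1) j').1 + pvDelA (second.getD j' ""), 1)
    ((pvTget dp i' j').1 +
      (if first.getD i' "" = second.getD j' "" then 0
       else pvEditA (first.getD i' "") (second.getD j' "")), 2))

theorem innerloop (first second : List String) {m n : Nat} (i' : Nat) (hi : i' < m)
    (t : List (List (Int × Int))) (ht : pvSz m n t)
    (hrow : ∀ b ≤ n, (pvTget t i' b).1 = pvBest first second i' b)
    (hcol : (pvTget t (i'+1) 0).1 = pvBest first second (i'+1) 0) :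
    ∀ k, k ≤ n →
      pvSz m n ((List.range k).foldl (pvStepIn first second i') t) ∧
      (∀ a b, a ≠ i'+1 →
        pvTget ((List.range k).foldl (pvStepIn first second i') t) a b = pvTget t a b) ∧
      (∀ b, b = 0 ∨ b > k →
        pvTget ((List.range k).foldl (pvStepIn first second i') t) (i'+1) b = pvTget t (i'+1) b) ∧
      (∀ b, 1 ≤ b → b ≤ k →
        (pvTget ((List.range k).foldl (pvStepIn first second i') t) (i'+1) b).1
          = pvBest first second (i'+1) b) := by
  intro k
  induction k with
  | zero =>
    intro _
    exact ⟨ht, fun a b _ => rfl, fun b _ => rfl, fun b h1 h2 => absurd h2 (by omega)⟩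
  | succ k ih =>
    intro hk
    obtain ⟨ihs, ihrows, ihlater, ihdone⟩ := ih (by omega)
    rw [List.range_succ, List.foldl_append, List.foldl_cons, List.foldl_nil]
    have hr1 : (pvTget ((List.range k).foldl (pvStepIn first second i') t) i' (k+1)).1
        = pvBest first second i' (k+1) := by
      rw [ihrows i' (k+1) (by omega)]; exact hrow (k+1) (by omega)
    have hr2 : (pvTget ((List.range k).foldl (pvStepIn first second i') t) i' k).1
        = pvBest first second i' k := by
      rw [ihrows i' k (by omega)]; exact hrow k (by omega)
    have hr3 : (pvTget ((List.range k).foldl (pvStepIn first second i') t) (i'+1) k).1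
        = pvBest first second (i'+1) k := by
      rcases Nat.eq_zero_or_pos k with h0 | h0
      · subst h0; rw [ihlater 0 (Or.inl rfl)]; exact hcol
      · exact ihdone k h0 (le_refl k)
    rw [pvStepIn]
    refine ⟨sz_tset ihs (by omega) _, ?_, ?_, ?_⟩
    · intro a b ha
      rw [tget_tset_ne_row _ _ _ ha]
      exact ihrows a b ha
    · intro b hb
      rw [tget_tset_ne_col _ _ _ (by omega)]
      exact ihlater b (by omega)
    · intro b hb1 hb2
      rcases Decidable.em (b = k + 1) with he | he
      · subst he
        rw [tget_tset_self _ (by rw [ihs.1]; omega) (by rw [row_len ihs (by omega)]; omega)]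
        rw [pvMax3_fst]
        dsimp only
        rw [hr1, hr2, hr3, pvBest_ss]
        simp only [pvDelA, sub_eq_add_neg]
        rfl
      · rw [tget_tset_ne_col _ _ _ he]
        exact ihdone b hb1 (by omega)

theorem outerloop (first second : List String) {m n : Nat}
    (t : List (List (Int × Int))) (ht : pvSz m n t)
    (hrow0 : ∀ b ≤ n, (pvTget t 0 b).1 = pvBest first second 0 b)
    (hcol : ∀ a ≤ m, (pvTget t a 0).1 = pvBest first second a 0) :
    ∀ k, k ≤ m →
      pvSz m n ((List.range k).foldl
        (fun dp i' => (List.range n).foldl (pvStepIn first second i') dp) t) ∧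
      (∀ a, a ≤ k → ∀ b, b ≤ n →
        (pvTget ((List.range k).foldl
          (fun dp i' => (List.range n).foldl (pvStepIn first second i') dp) t) a b).1
          = pvBest first second a b) ∧
      (∀ a, a > k → ∀ b,
        pvTget ((List.range k).foldl
          (fun dp i' => (List.range n).foldl (pvStepIn first second i') dp) t) a b
          = pvTget t a b) := by
  intro k
  induction k with
  | zero =>
    intro _
    refine ⟨ht, ?_, fun a _ b => rfl⟩
    intro a ha b hb
    interval_cases a
    exact hrow0 b hb
  | succ k ih =>
    intro hk
    obtain ⟨ihs, ihdone, ihlater⟩ := ih (by omega)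
    rw [List.range_succ, List.foldl_append, List.foldl_cons, List.foldl_nil]
    have hcolk : (pvTget ((List.range k).foldl
        (fun dp i' => (List.range n).foldl (pvStepIn first second i') dp) t) (k+1) 0).1
        = pvBest first second (k+1) 0 := by
      rw [ihlater (k+1) (by omega) 0]
      exact hcol (k+1) (by omega)
    obtain ⟨hs', hunch, hb0, hdone'⟩ :=
      innerloop first second k (by omega) _ ihs
        (fun b hb => ihdone k (le_refl k) b hb) hcolk n (le_refl n)
    refine ⟨hs', ?_, ?_⟩
    · intro a ha b hb
      rcases Decidable.em (a = k + 1) with he | he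
      · subst he
        rcases Nat.eq_zero_or_pos b with h0 | h0
        · subst h0
          rw [hb0 0 (Or.inl rfl)]
          exact hcolk
        · exact hdone' b h0 hb
      · rw [hunch a b he]
        exact ihdone a (by omega) b hb
    · intro a ha b
      rw [hunch a b (by omega)]
      exact ihlater a (by omega) b

theorem align_eq (first second : List String) :
    pvAlignA first second = pvBest first second first.length second.length := by
  have h0 := dp0_sz first.length second.length
  obtain ⟨hs1, hu1, hv1⟩ := colloop first _ h0 first.length le_rfl
  obtain ⟨hs2, hu2, hv2⟩ := rowloop second _ hs1 second.length le_rfl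
  have key : ∀ t, pvSz first.length second.length t →
      (∀ b ≤ second.length, (pvTget t 0 b).1 = pvBest first second 0 b) →
      (∀ a ≤ first.length, (pvTget t a 0).1 = pvBest first second a 0) →
      (pvTget ((List.range first.length).foldl
        (fun dp i' => (List.range second.length).foldl (pvStepIn first second i') dp) t)
        first.length second.length).1 = pvBest first second first.length second.length :=
    fun t ht h1 h2 =>
      (outerloop first second t ht h1 h2 first.length le_rfl).2.1
        first.length le_rfl second.length le_rfl
  simp only [pvAlignA]
  refine key _ (sz_tset hs2 (Nat.zero_le _) _) ?_ ?_
  · intro b hb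
    match b with
    | 0 =>
      rw [tget_tset_self _ (by rw [hs2.1]; omega) (by rw [row_len hs2 (Nat.zero_le _)]; omega)]
      simp [pvBest]
    | j'+1 =>
      rw [tget_tset_ne_col _ _ _ (by omega), hv2 j' (by omega)]
      simp [pvBest, pvDelA]
  · intro a ha
    match a with
    | 0 =>
      rw [tget_tset_self _ (by rw [hs2.1]; omega) (by rw [row_len hs2 (Nat.zero_le _)]; omega)]
      simp [pvBest]
    | i'+1 =>
      rw [tget_tset_ne_row _ _ _ (by omega), hu2 (i'+1) 0 (by omega), hv1 i' (by omega)]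
      simp [pvBest, pvDelA]

theorem pv_final (x y : String × List String) :
    calc_line_content_edit_penalty x y = calc_line_content_edit_penalty_alt x y := by
  rw [alt_eq]
  unfold calc_line_content_edit_penalty
  rw [align_eq]
  by_cases h : x.1 = y.1 <;> simp [h]
  omega


-- ===== VERDICT (by name: the statement is the Claim_ definition above) =====
theorem calc_line_content_edit_penalty_spec : Claim_equal_calc_line_content_edit_penalty := by
  intro x y _
  unfold Spec_calc_line_content_edit_penalty
  exact pv_final x y
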